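-- pv_equiv track=rewrite | github.com/xsuik33/TC-Practica4-2026 | Practica4TeoCom.py | get_substrings
-- ===== SOURCE A (Python) =====
-- def get_substrings(s: str) -> list[str]:
--     seen, result = set(), []
--     for i in range(len(s)):
--         for j in range(i + 1, len(s) + 1):
--             sub = s[i:j]
--             if sub not in seen:
--                 seen.add(sub)
--                 result.append(sub)
--     return sorted(result, key=lambda x: (len(x), x))
-- ===== SOURCE B (Python) =====
-- def get_substrings(s: str) -> list[str]:
--     n = len(s)
--     result = []
--     for length in range(1, n + 1):
--         group = set()
--         for i in range(n - length + 1):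
--             group.add(s[i:i + length])
--         result.extend(sorted(group))
--     return result
-- ===== Notes on version B (the rewrite author's own statement) =====
-- stated objective: alternative
-- what changed: B enumerates substrings length-major: for each length it dedups that length's substrings in a fresh set and sorts the group lexicographically, concatenating the groups in increasing length order instead of collecting everything in one global seen-set/result pass and doing one final (len, lex)-keyed sort.
import Mathlib
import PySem

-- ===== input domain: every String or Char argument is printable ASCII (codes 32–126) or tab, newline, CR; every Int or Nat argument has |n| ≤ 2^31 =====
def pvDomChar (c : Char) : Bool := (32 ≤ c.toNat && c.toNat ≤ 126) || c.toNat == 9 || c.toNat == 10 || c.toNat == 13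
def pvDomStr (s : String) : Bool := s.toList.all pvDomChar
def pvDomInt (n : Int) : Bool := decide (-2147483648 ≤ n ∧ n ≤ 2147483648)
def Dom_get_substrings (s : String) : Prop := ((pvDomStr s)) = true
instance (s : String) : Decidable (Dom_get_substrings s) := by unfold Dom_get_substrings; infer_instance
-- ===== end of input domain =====

-- B replaces A's single seen-set pass plus one global (len, lex)-keyed sort by length-major
-- enumeration with a per-length set and per-length lexicographic sorts (alternative decomposition).

-- ===== PORT A =====
def get_substrings (s : String) : List String :=
  let cs := s.toList
  let st := (PySem.List.pyRange 0 (PySem.Str.len s)).foldl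
    (fun (acc : PySem.Set String × List String) i =>
      (PySem.List.pyRange (i + 1) (PySem.Str.len s + 1)).foldl
        (fun acc j =>
          let sub := String.ofList (PySem.List.slice cs (some i) (some j))
          if PySem.Set.contains acc.1 sub then acc
          else (PySem.Set.add acc.1 sub, acc.2 ++ [sub])) acc)
    (PySem.Set.empty, [])
  PySem.List.sorted2 st.2 (fun x => PySem.Str.len x) (fun x => x)

-- ===== PORT B =====
def get_substrings_alt (s : String) : List String :=
  let cs := s.toList
  let n := PySem.Str.len s
  (PySem.List.pyRange 1 (n + 1)).foldl
    (fun out L =>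
      let group := (PySem.List.pyRange 0 (n - L + 1)).foldl
        (fun (g : PySem.Set String) i =>
          PySem.Set.add g (String.ofList (PySem.List.slice cs (some i) (some (i + L)))))
        PySem.Set.empty
      out ++ PySem.List.sorted group (fun x => x)) []

-- ===== PRECONDITION & SPEC =====
def Spec_get_substrings (s : String) (out : List String) : Prop := out = get_substrings_alt s
instance (s : String) (out : List String) : Decidable (Spec_get_substrings s out) := by unfold Spec_get_substrings; infer_instance

-- ===== CLAIM (what is proved, stated in full; the proofs are below) =====
def Claim_equal_get_substrings : Prop := ∀ (s : String), Dom_get_substrings s → Spec_get_substrings s (get_substrings s)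

-- ===== LEMMAS AND PROOFS =====

-- A's sort key (len(x), x), as a genuine lexicographic order on Int × String
def pvKey (x : String) : Lex (Int × String) := toLex (PySem.Str.len x, x)

-- s[i:j] as both programs build it
def pvSub (cs : List Char) (i j : Int) : String := String.ofList (PySem.List.slice cs (some i) (some j))

-- the stream of substrings in A's (i, j) enumeration order
def pvStreamA (cs : List Char) (n : Int) : List String :=
  (PySem.List.pyRange 0 n).flatMap
    (fun i => (PySem.List.pyRange (i + 1) (n + 1)).map (fun j => pvSub cs i j))

-- the stream of length-L substrings in B's enumeration order, and B's sorted length-L group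
def pvStreamB (cs : List Char) (n L : Int) : List String :=
  (PySem.List.pyRange 0 (n - L + 1)).map (fun i => pvSub cs i (i + L))

def pvG (cs : List Char) (n L : Int) : List String :=
  PySem.List.sorted (PySem.Set.ofList (pvStreamB cs n L)) (fun x => x)

-- sorted2 with keys (len, id) is sorted under the lexicographic key pvKey
theorem pv_sorted2_eq (xs : List String) :
    PySem.List.sorted2 xs (fun x => PySem.Str.len x) (fun x => x) = PySem.List.sorted xs pvKey := by
  simp only [PySem.List.sorted2, PySem.List.sorted, if_neg (by decide : ¬ (false = true))]
  have h : (fun a b : String => decide (PySem.Str.len a < PySem.Str.len b) ||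
      (!decide (PySem.Str.len b < PySem.Str.len a) && decide (a < b)))
      = fun a b => decide (pvKey a < pvKey b) := by
    funext a b
    simp only [pvKey, Prod.Lex.lt_iff, ofLex_toLex, PySem.Str.len_eq, String.length_toList,
      Nat.cast_inj, Nat.cast_lt]
    rcases Nat.lt_trichotomy a.length b.length with h | h | h
    · simp [h]
    · simp [h]
    · simp [Nat.lt_asymm h, Nat.ne_of_lt' h]
      intro hle; omega
  rw [h]

-- A's (seen, result) pair: both components stay equal and evolve by Set.add
theorem pv_foldPair (l : List String) (t : PySem.Set String) :
    l.foldl (fun acc x => if PySem.Set.contains acc.1 x then acc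
                          else (PySem.Set.add acc.1 x, acc.2 ++ [x])) (t, t)
      = (l.foldl PySem.Set.add t, l.foldl PySem.Set.add t) := by
  induction l generalizing t with
  | nil => rfl
  | cons x l ih =>
    simp only [List.foldl_cons]
    by_cases hc : PySem.Set.contains t x = true
    · have ha : PySem.Set.add t x = t := by
        simp [PySem.Set.add, PySem.Set.contains]
        simpa [PySem.Set.contains] using hc
      rw [if_pos hc, ha, ih]
    · have ha : PySem.Set.add t x = t ++ [x] := by
        simp [PySem.Set.add, PySem.Set.contains]
        simpa [PySem.Set.contains] using hc
      rw [if_neg hc, ha, ← ha, ih]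

theorem pv_A_eq (s : String) :
    get_substrings s
      = PySem.List.sorted2 (PySem.Set.ofList (pvStreamA s.toList (PySem.Str.len s)))
          (fun x => PySem.Str.len x) (fun x => x) := by
  show PySem.List.sorted2 _ _ _ = _
  congr 1
  have h1 : ((PySem.List.pyRange 0 (PySem.Str.len s)).foldl
      (fun (acc : PySem.Set String × List String) i =>
        (PySem.List.pyRange (i + 1) (PySem.Str.len s + 1)).foldl
          (fun acc j =>
            let sub := String.ofList (PySem.List.slice s.toList (some i) (some j))
            if PySem.Set.contains acc.1 sub then acc
            else (PySem.Set.add acc.1 sub, acc.2 ++ [sub])) acc)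
      (PySem.Set.empty, []))
      = (pvStreamA s.toList (PySem.Str.len s)).foldl
          (fun acc x => if PySem.Set.contains acc.1 x then acc
                        else (PySem.Set.add acc.1 x, acc.2 ++ [x])) ([], []) := by
    rw [pvStreamA, List.foldl_flatMap]
    simp only [List.foldl_map, pvSub]
    rfl
  rw [h1, pv_foldPair, PySem.Set.ofList_eq_foldl]

theorem pv_B_eq (s : String) :
    get_substrings_alt s
      = (PySem.List.pyRange 1 (PySem.Str.len s + 1)).flatMap (pvG s.toList (PySem.Str.len s)) := by
  show List.foldl _ [] _ = _
  have h : ∀ L, (PySem.List.pyRange 0 (PySem.Str.len s - L + 1)).foldl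
        (fun (g : PySem.Set String) i =>
          PySem.Set.add g (String.ofList (PySem.List.slice s.toList (some i) (some (i + L)))))
        PySem.Set.empty
      = PySem.Set.ofList (pvStreamB s.toList (PySem.Str.len s) L) := by
    intro L
    rw [PySem.Set.ofList_eq_foldl, pvStreamB, List.foldl_map]
    rfl
  calc (PySem.List.pyRange 1 (PySem.Str.len s + 1)).foldl
        (fun out L => out ++ PySem.List.sorted ((PySem.List.pyRange 0 (PySem.Str.len s - L + 1)).foldl
          (fun (g : PySem.Set String) i =>
            PySem.Set.add g (String.ofList (PySem.List.slice s.toList (some i) (some (i + L)))))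
          PySem.Set.empty) (fun x => x)) []
      = (PySem.List.pyRange 1 (PySem.Str.len s + 1)).foldl
          (fun out L => out ++ pvG s.toList (PySem.Str.len s) L) [] := by
        apply PySem.List.foldl_congr_mem
        intro acc L _
        rw [h L]; rfl
    _ = _ := by
        rw [PySem.List.foldl_append_eq_flatMap]; simp [List.flatMap]

theorem pv_len_sub (cs : List Char) (i j : Int) (h0 : 0 ≤ i) (hij : i ≤ j) (hj : j ≤ (cs.length : Int)) :
    PySem.Str.len (pvSub cs i j) = j - i := by
  obtain ⟨a, rfl⟩ : ∃ a : Nat, i = (a : Int) := ⟨i.toNat, (Int.toNat_of_nonneg h0).symm⟩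
  have hj' : j = (a : Int) + ((j - a).toNat : Int) := by omega
  rw [pvSub, hj', PySem.List.slice_natCast_add, PySem.Str.len_eq]
  simp
  omega

theorem pv_mem_G_len (cs : List Char) (L : Int) (x : String) (hL : 1 ≤ L)
    (hx : x ∈ pvG cs (cs.length : Int) L) : PySem.Str.len x = L := by
  rw [pvG, PySem.List.mem_sorted, PySem.Set.mem_ofList, pvStreamB] at hx
  obtain ⟨i, hi, rfl⟩ := List.mem_map.mp hx
  rw [PySem.List.mem_pyRange_one] at hi
  rw [pv_len_sub cs i (i + L) (by omega) (by omega) (by omega)]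
  omega

theorem pv_mem_flat_iff (cs : List Char) (x : String) :
    x ∈ (PySem.List.pyRange 1 ((cs.length : Int) + 1)).flatMap (pvG cs (cs.length : Int))
      ↔ x ∈ pvStreamA cs (cs.length : Int) := by
  simp only [List.mem_flatMap, pvG, PySem.List.mem_sorted, PySem.Set.mem_ofList, pvStreamB,
    pvStreamA, List.mem_map, PySem.List.mem_pyRange_one]
  constructor
  · rintro ⟨L, hL, i, hi, rfl⟩
    exact ⟨i, by omega, i + L, by omega, rfl⟩
  · rintro ⟨i, hi, j, hj, rfl⟩
    refine ⟨j - i, by omega, i, by omega, ?_⟩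
    have h : i + (j - i) = j := by omega
    rw [h]

theorem pv_pairwise_flat (cs : List Char) :
    ((PySem.List.pyRange 1 ((cs.length : Int) + 1)).flatMap (pvG cs (cs.length : Int))).Pairwise
      (fun a b => pvKey a < pvKey b) := by
  rw [List.flatMap_def, List.pairwise_flatten]
  constructor
  · intro l hl
    obtain ⟨L, hL, rfl⟩ := List.mem_map.mp hl
    rw [PySem.List.mem_pyRange_one] at hL
    have hpw := PySem.List.sorted_ofList_pairwise_lt (pvStreamB cs (cs.length : Int) L)
    rw [show PySem.List.sorted (PySem.Set.ofList (pvStreamB cs (cs.length : Int) L)) (fun x => x)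
        = pvG cs (cs.length : Int) L from rfl] at hpw
    refine List.Pairwise.imp_of_mem ?_ hpw
    intro a b ha hb hab
    have la := pv_mem_G_len cs L a (by omega) ha
    have lb := pv_mem_G_len cs L b (by omega) hb
    rw [PySem.Str.len_eq, String.length_toList] at la lb
    simp [pvKey, Prod.Lex.lt_iff, hab]
    omega
  · rw [List.pairwise_map]
    refine List.Pairwise.imp_of_mem ?_ (PySem.List.pairwise_lt_pyRange_one 1 ((cs.length : Int) + 1))
    intro L M hL hM hLM x hx y hy
    rw [PySem.List.mem_pyRange_one] at hL hM
    have lx := pv_mem_G_len cs L x (by omega) hx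
    have ly := pv_mem_G_len cs M y (by omega) hy
    rw [PySem.Str.len_eq, String.length_toList] at lx ly
    simp [pvKey, Prod.Lex.lt_iff]
    exact Or.inl (by omega)

-- ===== VERDICT (by name: the statement is the Claim_ definition above) =====
theorem get_substrings_spec : Claim_equal_get_substrings := by
  intro s _
  show get_substrings s = get_substrings_alt s
  rw [pv_A_eq, pv_sorted2_eq, pv_B_eq, PySem.Str.len_eq]
  have hpw := pv_pairwise_flat s.toList
  have hnodB : ((PySem.List.pyRange 1 ((s.toList.length : Int) + 1)).flatMap
      (pvG s.toList (s.toList.length : Int))).Nodup :=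
    hpw.imp (fun h he => absurd (he ▸ h) (lt_irrefl _))
  apply PySem.List.sorted_eq_of_perm_of_pairwise_lt _ _ pvKey ?_ hpw
  rw [List.perm_ext_iff_of_nodup hnodB (PySem.Set.nodup_ofList _)]
  intro a
  rw [pv_mem_flat_iff, PySem.Set.mem_ofList]
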